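-- pv_equiv track=rewrite | github.com/abhi1kumar/CSE835-Algorithmic-Graph-Theory | exam3/function/pg.py | all_nq_sub
-- ===== SOURCE A (Python) =====
-- def all_nq_sub(n,q):
--     '''
--     Returns all binary patterns of length n with q bit set to 1
--     Example: pg.all_nq_sub(5, 3) will return ['00111', '01011', '01101', '01110', '10011', '10101', '10110', '11001', '11010', '11100']
--     '''
--     if n == 0:
--         return []
--     if q > n:
--         return []
--     if q == 0:
--         return ['0' * int(n)]
--     if n == q:
--         return ['1' * int(q)]
--     L = []
--     for x in all_nq_sub(n - 1, q - 1):
--         L.append('1' + x)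
--     for x in all_nq_sub(n - 1, q):
--         L.append('0' + x)
--     L.sort()
--     return L
-- ===== SOURCE B (Python) =====
-- def all_nq_sub(n, q):
--     """Iterative enumeration: start from the smallest pattern 0^(n-q) 1^q and
--     repeatedly compute the lexicographic successor among the weight-q strings
--     (classic next-combination step), so the sorted list is produced directly
--     with no recursion and no sorting."""
--     if n <= 0 or q < 0 or q > n:
--         return []
--     n, q = int(n), int(q)
--     s = ['0'] * (n - q) + ['1'] * q
--     out = [''.join(s)]
--     while True:
--         # rightmost position i with s[i] == '0' and s[i+1] == '1'
--         i = n - 2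
--         while i >= 0 and not (s[i] == '0' and s[i + 1] == '1'):
--             i -= 1
--         if i < 0:
--             return out
--         ones = s[i + 1:].count('1') - 1
--         s[i] = '1'
--         s[i + 1:] = ['0'] * (n - i - 1 - ones) + ['1'] * ones
--         out.append(''.join(s))
-- ===== Notes on version B (the rewrite author's own statement) =====
-- stated objective: alternative
-- what changed: B replaces A's Pascal-rule recursion with per-level sorting by a non-recursive loop that starts at the smallest pattern 0^(n-q)1^q and repeatedly applies the classic next-combination successor step, emitting the sorted list directly with no sort and no recursion.
-- outside the precondition, e.g. on all_nq_sub(-3, -3): A returns [''], B returns []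
import Mathlib
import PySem

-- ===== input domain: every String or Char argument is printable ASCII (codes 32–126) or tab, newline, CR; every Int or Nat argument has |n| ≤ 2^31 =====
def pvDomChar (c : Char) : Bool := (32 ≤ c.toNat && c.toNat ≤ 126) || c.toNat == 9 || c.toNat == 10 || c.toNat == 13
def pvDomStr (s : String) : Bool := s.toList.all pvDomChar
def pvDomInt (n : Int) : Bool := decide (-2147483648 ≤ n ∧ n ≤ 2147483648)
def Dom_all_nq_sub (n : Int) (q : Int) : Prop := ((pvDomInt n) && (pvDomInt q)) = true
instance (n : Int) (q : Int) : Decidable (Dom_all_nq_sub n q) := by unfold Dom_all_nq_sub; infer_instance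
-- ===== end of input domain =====

-- B enumerates the same sorted list by a non-recursive loop: start at the smallest
-- pattern and repeatedly apply the classic next-combination successor step (no sort).
-- Strings are ported on the List Char side (PySem convention); each port joins with String.ofList.
-- A's recursion is ported with fuel n.toNat + 1 (inside Pre_ the fuel never runs out);
-- B's while-loop with fuel C(n,q), an upper bound on its iteration count.

-- ===== PORT A =====
-- literal transliteration of A: append loops ('1'+x then '0'+x) into accumulator L, then L.sort()
def pvARec : Nat → Int → Int → List (List Char)
  | 0, _, _ => []
  | fuel+1, n, q =>
    if n = 0 then [] else
    if q > n then [] else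
    if q = 0 then [PySem.List.pyRepeat ['0'] n] else
    if n = q then [PySem.List.pyRepeat ['1'] q] else
      let L : List (List Char) := (pvARec fuel (n-1) (q-1)).foldl (fun L x => L ++ [('1' :: x)]) []
      let L : List (List Char) := (pvARec fuel (n-1) q).foldl (fun L x => L ++ [('0' :: x)]) L
      PySem.List.sorted L (fun x => x)

def all_nq_sub (n : Int) (q : Int) : List String :=
  (pvARec (n.toNat + 1) n q).map (fun cs => String.ofList cs)

-- ===== PORT B =====
-- the inner downward scan: i runs from k-1 down to 0, looking for s[i]='0' ∧ s[i+1]='1'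
-- (out-of-range getD returns ' ', which never satisfies the test, exactly as i ≤ n-2 in Python)
def pvScan (s : List Char) : Nat → Option Nat
  | 0 => none
  | i+1 => if s.getD i ' ' = '0' ∧ s.getD (i+1) ' ' = '1' then some i else pvScan s i

def pvScanTop (s : List Char) : Option Nat := pvScan s (s.length - 1)

-- the successor step: ones = s[i+1:].count('1') - 1; s[i] = '1'; s[i+1:] = zeros ++ ones
def pvNext (s : List Char) (i : Nat) : List Char :=
  let ones := (s.drop (i+1)).count '1' - 1
  s.take i ++ '1' :: (List.replicate (s.length - i - 1 - ones) '0' ++ List.replicate ones '1')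

def pvBLoop : Nat → List Char → List String → List String
  | 0, _, out => out
  | fuel+1, s, out =>
    match pvScanTop s with
    | none => out
    | some i =>
      let t := pvNext s i
      pvBLoop fuel t (out ++ [String.ofList t])

def all_nq_sub_alt (n : Int) (q : Int) : List String :=
  if n ≤ 0 ∨ q < 0 ∨ q > n then []
  else
    let s := List.replicate (n - q).toNat '0' ++ List.replicate q.toNat '1'
    pvBLoop (Nat.choose n.toNat q.toNat) s [String.ofList s]

-- ===== PRECONDITION & SPEC =====
-- Pre_ excludes (a) inputs where A raises RecursionError (q < n < 0 recurses forever; depth ≈ n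
-- exceeds CPython's limit for n ≥ 950 unless the q = 0 / q ≥ n shortcut fires), and (b) the
-- negative-count corner n = q < 0, where A's ['1'*q] is [''] by Python's negative string
-- repetition — not a binary pattern; B returns [] there.
def Pre_all_nq_sub (n : Int) (q : Int) : Prop :=
  (q < 0 → ((0 ≤ n ∧ n < 950) ∨ n < q)) ∧ (0 ≤ q → (n < 950 ∨ q = 0 ∨ n ≤ q))
instance (n : Int) (q : Int) : Decidable (Pre_all_nq_sub n q) := by unfold Pre_all_nq_sub; infer_instance

def pvWitness_all_nq_sub : Int × Int := (5, 3)

def Spec_all_nq_sub (n : Int) (q : Int) (out : List String) : Prop := out = all_nq_sub_alt n q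
instance (n : Int) (q : Int) (out : List String) : Decidable (Spec_all_nq_sub n q out) := by unfold Spec_all_nq_sub; infer_instance

-- ===== CLAIM (what is proved, stated in full; the proofs are below) =====
def Claim_equal_all_nq_sub : Prop := ∀ (n : Int) (q : Int), Dom_all_nq_sub n q → Pre_all_nq_sub n q → Spec_all_nq_sub n q (all_nq_sub n q)

-- ===== LEMMAS AND PROOFS =====

-- the reference list: all length-n bit strings with q ones, in increasing lexicographic order
def pvComb : Nat → Nat → List (List Char)
  | 0, 0 => [[]]
  | 0, _+1 => []
  | n+1, 0 => (pvComb n 0).map (fun x => '0' :: x)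
  | n+1, q+1 => (pvComb n (q+1)).map (fun x => '0' :: x) ++ (pvComb n q).map (fun x => '1' :: x)

theorem pvComb_zero : ∀ n, pvComb n 0 = [List.replicate n '0'] := by
  intro n
  induction n with
  | zero => rfl
  | succ n ih => simp [pvComb, ih, List.replicate_succ]

theorem pvComb_nil_of_lt : ∀ n q, n < q → pvComb n q = [] := by
  intro n
  induction n with
  | zero => intro q h; match q, h with | q+1, _ => rfl
  | succ n ih =>
    intro q h
    match q, h with
    | q+1, h => simp [pvComb, ih q (by omega), ih (q+1) (by omega)]

theorem pvComb_self : ∀ n, pvComb n n = [List.replicate n '1'] := by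
  intro n
  induction n with
  | zero => rfl
  | succ n ih => simp [pvComb, ih, pvComb_nil_of_lt n (n+1) (by omega), List.replicate_succ]

theorem pvComb_mem : ∀ n q s, s ∈ pvComb n q →
    s.length = n ∧ s.count '1' = q ∧ ∀ c ∈ s, c = '0' ∨ c = '1' := by
  intro n
  induction n with
  | zero =>
    intro q s hs
    match q with
    | 0 => simp [pvComb] at hs; subst hs; simp
    | q+1 => simp [pvComb] at hs
  | succ n ih =>
    intro q s hs
    match q with
    | 0 =>
      simp only [pvComb, List.mem_map] at hs
      obtain ⟨t, ht, rfl⟩ := hs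
      obtain ⟨h1, h2, h3⟩ := ih 0 t ht
      refine ⟨by simp [h1], by simp [h2], ?_⟩
      intro c hc
      rcases List.mem_cons.mp hc with rfl | hc
      · left; rfl
      · exact h3 c hc
    | q+1 =>
      simp only [pvComb, List.mem_append, List.mem_map] at hs
      rcases hs with ⟨t, ht, rfl⟩ | ⟨t, ht, rfl⟩
      · obtain ⟨h1, h2, h3⟩ := ih (q+1) t ht
        refine ⟨by simp [h1], by simp [h2], ?_⟩
        intro c hc
        rcases List.mem_cons.mp hc with rfl | hc
        · left; rfl
        · exact h3 c hc
      · obtain ⟨h1, h2, h3⟩ := ih q t ht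
        refine ⟨by simp [h1], by simp [h2], ?_⟩
        intro c hc
        rcases List.mem_cons.mp hc with rfl | hc
        · right; rfl
        · exact h3 c hc

theorem pvComb_head : ∀ n q, q ≤ n →
    ∃ r, pvComb n q = (List.replicate (n - q) '0' ++ List.replicate q '1') :: r := by
  intro n
  induction n with
  | zero => intro q h; interval_cases q; exact ⟨[], rfl⟩
  | succ n ih =>
    intro q h
    match q with
    | 0 => exact ⟨[], by simp [pvComb_zero]⟩
    | q+1 =>
      by_cases hle : q + 1 ≤ n
      · obtain ⟨r, hr⟩ := ih (q+1) hle
        refine ⟨(r.map (fun x => '0' :: x)) ++ (pvComb n q).map (fun x => '1' :: x), ?_⟩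
        have key : List.replicate (n + 1 - (q+1)) '0' ++ List.replicate (q+1) '1' =
            '0' :: (List.replicate (n - (q + 1)) '0' ++ List.replicate (q + 1) '1') := by
          have h2 : n + 1 - (q+1) = (n - (q+1)) + 1 := by omega
          rw [h2, List.replicate_succ, List.cons_append]
        rw [key]
        simp [pvComb, hr]
      · have hq : q = n := by omega
        subst hq
        refine ⟨[], ?_⟩
        simp [pvComb, pvComb_nil_of_lt _ _ (Nat.lt_succ_self _), pvComb_self, List.replicate_succ]

theorem pvComb_length : ∀ n q, (pvComb n q).length = Nat.choose n q := by
  intro n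
  induction n with
  | zero => intro q; match q with | 0 => rfl | q+1 => rfl
  | succ n ih =>
    intro q
    match q with
    | 0 => simp [pvComb, ih 0]
    | q+1 => simp [pvComb, ih, Nat.choose_succ_succ, Nat.add_comm]

theorem pvComb_pairwise : ∀ n q, (pvComb n q).Pairwise (· < ·) := by
  intro n
  induction n with
  | zero => intro q; match q with | 0 => exact List.pairwise_singleton _ _ | q+1 => exact List.Pairwise.nil
  | succ n ih =>
    intro q
    match q with
    | 0 =>
      exact (List.pairwise_map).mpr ((ih 0).imp (fun h => List.Lex.cons h))
    | q+1 =>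
      refine List.pairwise_append.mpr ⟨?_, ?_, ?_⟩
      · exact (List.pairwise_map).mpr ((ih (q+1)).imp (fun h => List.Lex.cons h))
      · exact (List.pairwise_map).mpr ((ih q).imp (fun h => List.Lex.cons h))
      · intro x hx y hy
        simp only [List.mem_map] at hx hy
        obtain ⟨x', -, rfl⟩ := hx
        obtain ⟨y', -, rfl⟩ := hy
        exact List.Lex.rel (by decide)

-- ---- scan lemmas ----

theorem pvScan_cons (c : Char) (t : List Char) : ∀ k, pvScan (c :: t) (k+1) =
    (match pvScan t k with
     | some j => some (j+1)
     | none => if c = '0' ∧ t.getD 0 ' ' = '1' then some 0 else none) := by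
  intro k
  induction k with
  | zero => simp [pvScan]
  | succ k ih =>
    have hL : pvScan (c :: t) (k+1+1) =
        if t.getD k ' ' = '0' ∧ t.getD (k+1) ' ' = '1' then some (k+1)
        else pvScan (c :: t) (k+1) := by
      show (if (c::t).getD (k+1) ' ' = '0' ∧ (c::t).getD (k+1+1) ' ' = '1'
            then some (k+1) else pvScan (c::t) (k+1)) = _
      rw [List.getD_cons_succ, List.getD_cons_succ]
    have hR : pvScan t (k+1) =
        if t.getD k ' ' = '0' ∧ t.getD (k+1) ' ' = '1' then some k else pvScan t k := rfl
    rw [hL, hR]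
    by_cases h : t.getD k ' ' = '0' ∧ t.getD (k+1) ' ' = '1'
    · rw [if_pos h, if_pos h]
    · rw [if_neg h, if_neg h, ih]

theorem pvScanTop_cons (c : Char) (t : List Char) (h : t ≠ []) :
    pvScanTop (c :: t) = (match pvScanTop t with
      | some j => some (j+1)
      | none => if c = '0' ∧ t.getD 0 ' ' = '1' then some 0 else none) := by
  obtain ⟨a, t', rfl⟩ := List.exists_cons_of_ne_nil h
  show pvScan (c :: a :: t') ((c :: a :: t').length - 1) = _
  have h1 : (c :: a :: t').length - 1 = t'.length + 1 := by simp
  have h2 : (a :: t').length - 1 = t'.length := by simp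
  rw [h1, pvScan_cons]
  rfl

-- a string with no "01" pattern is all ones then all zeros
theorem pvScanTop_none_shape : ∀ (s : List Char), (∀ c ∈ s, c = '0' ∨ c = '1') →
    pvScanTop s = none →
    s = List.replicate (s.count '1') '1' ++ List.replicate (s.length - s.count '1') '0' := by
  intro s
  induction s with
  | nil => intro _ _; rfl
  | cons c t ih =>
    intro hbits hnone
    by_cases ht : t = []
    · subst ht
      rcases hbits c (by simp) with rfl | rfl
      · rfl
      · rfl
    · rw [pvScanTop_cons c t ht] at hnone
      cases hscan : pvScanTop t with
      | some j => rw [hscan] at hnone; simp at hnone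
      | none =>
        rw [hscan] at hnone
        simp only [] at hnone
        have hcond : ¬(c = '0' ∧ t.getD 0 ' ' = '1') := by
          intro hc; rw [if_pos hc] at hnone; simp at hnone
        have hts := ih (fun d hd => hbits d (List.mem_cons_of_mem c hd)) hscan
        rcases hbits c (by simp) with rfl | rfl
        · -- c = '0' : t must start with '0', so t.count '1' = 0
          have hk : t.count '1' = 0 := by
            by_contra hk0
            apply hcond
            refine ⟨rfl, ?_⟩
            obtain ⟨k, hk⟩ : ∃ k, t.count '1' = k + 1 := ⟨t.count '1' - 1, by omega⟩
            rw [hk] at hts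
            rw [hts]
            simp [List.replicate_succ]
          have hts' : t = List.replicate t.length '0' := by
            rw [hk] at hts
            simpa using hts
          have hcnt : (('0' : Char) :: t).count '1' = 0 := by
            simp [hk]
          rw [hcnt]
          simp only [List.replicate_zero, List.nil_append, List.length_cons, Nat.sub_zero]
          rw [List.replicate_succ]
          exact congrArg _ hts'
        · -- c = '1'
          have h1 : (('1' : Char) :: t).count '1' = t.count '1' + 1 := by
            simp
          have h2 : (('1' : Char) :: t).length - (t.count '1' + 1) = t.length - t.count '1' := by
            simp
          rw [h1, h2, List.replicate_succ, List.cons_append]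
          exact congrArg _ hts

theorem pvScanTop_zeros : ∀ b, pvScanTop (List.replicate b '0') = none := by
  intro b
  induction b with
  | zero => rfl
  | succ b ih =>
    by_cases hb : b = 0
    · subst hb; rfl
    · rw [List.replicate_succ, pvScanTop_cons _ _ (by simp [hb]), ih]
      have h0 : (List.replicate b '0')[0]?.getD ' ' = '0' := by
        match b, hb with
        | b+1, _ => simp [List.replicate_succ]
      simp [h0]

-- ---- successor-step lemmas ----

theorem pvNext_cons (c : Char) (t : List Char) (i : Nat) :
    pvNext (c :: t) (i+1) = c :: pvNext t i := by
  simp only [pvNext, List.drop_succ_cons, List.take_succ_cons, List.length_cons, List.cons_append]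
  have h : t.length + 1 - (i + 1) - 1 = t.length - i - 1 := by omega
  rw [h]

-- ---- "elements after s" ----

def pvAfter : List (List Char) → List Char → List (List Char)
  | [], _ => []
  | a :: t, s => if a = s then t else pvAfter t s

theorem pvAfter_cons_self (s : List Char) (l : List (List Char)) : pvAfter (s :: l) s = l := by
  simp [pvAfter]

theorem pvAfter_append_left {x : List Char} {l1 : List (List Char)} (h : x ∈ l1)
    (l2 : List (List Char)) : pvAfter (l1 ++ l2) x = pvAfter l1 x ++ l2 := by
  induction l1 with
  | nil => simp at h
  | cons a t ih =>
    by_cases ha : a = x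
    · simp [pvAfter, ha]
    · have : x ∈ t := by rcases List.mem_cons.mp h with h' | h'; exact absurd h'.symm ha; exact h'
      simp [pvAfter, ha, ih this]

theorem pvAfter_append_right {x : List Char} {l1 : List (List Char)} (h : x ∉ l1)
    (l2 : List (List Char)) : pvAfter (l1 ++ l2) x = pvAfter l2 x := by
  induction l1 with
  | nil => simp
  | cons a t ih =>
    have ha : a ≠ x := fun he => h (he ▸ List.mem_cons_self)
    have : x ∉ t := fun ht => h (List.mem_cons_of_mem a ht)
    simp [pvAfter, ha, ih this]

theorem pvAfter_map {f : List Char → List Char} (hf : Function.Injective f)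
    (l : List (List Char)) (x : List Char) :
    pvAfter (l.map f) (f x) = (pvAfter l x).map f := by
  induction l with
  | nil => simp [pvAfter]
  | cons a t ih =>
    by_cases ha : a = x
    · simp [pvAfter, ha]
    · have : f a ≠ f x := fun he => ha (hf he)
      simp [pvAfter, this, ha, ih]

theorem pv_cons_inj (c : Char) : Function.Injective (fun x : List Char => c :: x) := by
  intro a b h; simpa using h

-- ---- the successor lemma: the scan/rewrite step moves one place forward in pvComb ----

theorem pvSucc : ∀ n q s, s ∈ pvComb n q →
    (pvScanTop s = none → pvAfter (pvComb n q) s = []) ∧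
    (∀ i, pvScanTop s = some i →
       pvNext s i ∈ pvComb n q ∧
       pvAfter (pvComb n q) s = pvNext s i :: pvAfter (pvComb n q) (pvNext s i)) := by
  intro n
  induction n with
  | zero =>
    intro q s hs
    match q with
    | 0 =>
      simp [pvComb] at hs
      subst hs
      refine ⟨fun _ => by simp [pvComb, pvAfter], fun i hi => ?_⟩
      rw [show pvScanTop ([] : List Char) = none from rfl] at hi
      cases hi
    | q+1 => simp [pvComb] at hs
  | succ n ih =>
    intro q s hs
    match q with
    | 0 =>
      rw [pvComb_zero] at hs ⊢
      simp at hs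
      subst hs
      have hnone : pvScanTop (List.replicate (n+1) '0') = none := pvScanTop_zeros (n+1)
      refine ⟨fun _ => by simp [pvAfter], fun i hi => ?_⟩
      rw [hnone] at hi; simp at hi
    | q+1 =>
      have hcombdef : pvComb (n+1) (q+1) =
          (pvComb n (q+1)).map (fun x => '0' :: x) ++ (pvComb n q).map (fun x => '1' :: x) := rfl
      rw [hcombdef] at hs
      rcases List.mem_append.mp hs with h0 | h1
      · -- s = '0' :: t, t ∈ pvComb n (q+1)
        obtain ⟨t, ht, rfl⟩ := List.mem_map.mp h0
        obtain ⟨hlen, hcnt, hbits⟩ := pvComb_mem n (q+1) t ht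
        have hqn : q + 1 ≤ n := hcnt ▸ hlen ▸ List.count_le_length
        have htne : t ≠ [] := by
          intro he; rw [he] at hlen; simp at hlen; omega
        have hmap0 : ('0' :: t) ∈ (pvComb n (q+1)).map (fun x => '0' :: x) :=
          List.mem_map.mpr ⟨t, ht, rfl⟩
        cases hscan : pvScanTop t with
        | some j =>
          obtain ⟨hmem, hafter⟩ := (ih (q+1) t ht).2 j hscan
          have hstop : pvScanTop ('0' :: t) = some (j+1) := by
            rw [pvScanTop_cons _ _ htne, hscan]
          refine ⟨fun hn => by rw [hstop] at hn; simp at hn, fun i hi => ?_⟩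
          rw [hstop] at hi
          obtain rfl : j + 1 = i := by simpa using hi
          rw [pvNext_cons]
          constructor
          · rw [hcombdef]
            exact List.mem_append_left _ (List.mem_map.mpr ⟨pvNext t j, hmem, rfl⟩)
          · rw [hcombdef, pvAfter_append_left hmap0,
                pvAfter_map (pv_cons_inj '0'), hafter]
            rw [pvAfter_append_left (List.mem_map.mpr ⟨pvNext t j, hmem, rfl⟩),
                pvAfter_map (pv_cons_inj '0')]
            simp
        | none =>
          have hafterZ : pvAfter (pvComb n (q+1)) t = [] := (ih (q+1) t ht).1 hscan
          have hts : t = List.replicate (q+1) '1' ++ List.replicate (n - (q+1)) '0' := by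
            have := pvScanTop_none_shape t hbits hscan
            rw [hcnt, hlen] at this
            exact this
          have hhead : t.getD 0 ' ' = '1' := by rw [hts]; simp [List.replicate_succ]
          have hstop : pvScanTop ('0' :: t) = some 0 := by
            rw [pvScanTop_cons _ _ htne, hscan]
            show (if ('0':Char) = '0' ∧ t.getD 0 ' ' = '1' then some 0 else none) = some 0
            rw [if_pos ⟨rfl, hhead⟩]
          refine ⟨fun hn => by rw [hstop] at hn; simp at hn, fun i hi => ?_⟩
          rw [hstop] at hi
          obtain rfl : 0 = i := by simpa using hi
          obtain ⟨r, hr⟩ := pvComb_head n q (by omega)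
          have hnext : pvNext ('0' :: t) 0 =
              '1' :: (List.replicate (n - q) '0' ++ List.replicate q '1') := by
            simp only [pvNext, List.take_zero, List.drop_succ_cons, List.drop_zero,
              List.length_cons, List.nil_append]
            rw [hcnt, hlen]
            have h1 : n + 1 - 0 - 1 - (q + 1 - 1) = n - q := by omega
            have h2 : q + 1 - 1 = q := by omega
            rw [h1, h2]
          rw [hnext]
          constructor
          · rw [hcombdef, hr]
            exact List.mem_append_right _ (List.mem_map.mpr ⟨_, by simp, rfl⟩)
          · rw [hcombdef, pvAfter_append_left hmap0, pvAfter_map (pv_cons_inj '0'), hafterZ]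
            have hnotmem : ('1' :: (List.replicate (n - q) '0' ++ List.replicate q '1')) ∉
                (pvComb n (q+1)).map (fun x => '0' :: x) := by
              intro hmem
              obtain ⟨y, -, hy⟩ := List.mem_map.mp hmem
              simp at hy
            rw [pvAfter_append_right hnotmem, hr]
            simp [pvAfter_cons_self]
      · -- s = '1' :: t, t ∈ pvComb n q
        obtain ⟨t, ht, rfl⟩ := List.mem_map.mp h1
        obtain ⟨hlen, hcnt, hbits⟩ := pvComb_mem n q t ht
        have hnotmem0 : ∀ u : List Char, ('1' :: u) ∉ (pvComb n (q+1)).map (fun x => '0' :: x) := by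
          intro u hmem
          obtain ⟨y, -, hy⟩ := List.mem_map.mp hmem
          simp at hy
        by_cases htne : t = []
        · subst htne
          have hn0 : n = 0 := by simpa using hlen.symm
          have hq0 : q = 0 := by simpa using hcnt.symm
          subst hn0; subst hq0
          refine ⟨fun _ => ?_, fun i hi => by simp [pvScanTop, pvScan] at hi⟩
          rw [hcombdef, pvAfter_append_right (hnotmem0 [])]
          simp [pvComb, pvAfter]
        · cases hscan : pvScanTop t with
          | some j =>
            obtain ⟨hmem, hafter⟩ := (ih q t ht).2 j hscan
            have hstop : pvScanTop ('1' :: t) = some (j+1) := by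
              rw [pvScanTop_cons _ _ htne, hscan]
            refine ⟨fun hn => by rw [hstop] at hn; simp at hn, fun i hi => ?_⟩
            rw [hstop] at hi
            obtain rfl : j + 1 = i := by simpa using hi
            rw [pvNext_cons]
            constructor
            · rw [hcombdef]
              exact List.mem_append_right _ (List.mem_map.mpr ⟨pvNext t j, hmem, rfl⟩)
            · rw [hcombdef, pvAfter_append_right (hnotmem0 t),
                  pvAfter_map (pv_cons_inj '1'), hafter]
              rw [pvAfter_append_right (hnotmem0 (pvNext t j)),
                  pvAfter_map (pv_cons_inj '1')]
              simp
          | none =>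
            have hafterO : pvAfter (pvComb n q) t = [] := (ih q t ht).1 hscan
            have hstop : pvScanTop ('1' :: t) = none := by
              rw [pvScanTop_cons _ _ htne, hscan]
              simp
            refine ⟨fun _ => ?_, fun i hi => by rw [hstop] at hi; simp at hi⟩
            rw [hcombdef, pvAfter_append_right (hnotmem0 t),
                pvAfter_map (pv_cons_inj '1'), hafterO]
            simp

-- ---- B's loop walks the tail of pvComb ----

theorem pvLoop : ∀ (fuel N Q : Nat) (s : List Char) (out : List String),
    s ∈ pvComb N Q → (pvAfter (pvComb N Q) s).length < fuel →
    pvBLoop fuel s out = out ++ (pvAfter (pvComb N Q) s).map String.ofList := by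
  intro fuel
  induction fuel with
  | zero => intro N Q s out _ h; omega
  | succ fuel ih =>
    intro N Q s out hs hlt
    cases hscan : pvScanTop s with
    | none =>
      have h0 : pvAfter (pvComb N Q) s = [] := (pvSucc N Q s hs).1 hscan
      simp [pvBLoop, hscan, h0]
    | some i =>
      obtain ⟨hmem, hafter⟩ := (pvSucc N Q s hs).2 i hscan
      have hlen : (pvAfter (pvComb N Q) (pvNext s i)).length < fuel := by
        rw [hafter] at hlt; simpa using Nat.lt_of_succ_lt_succ hlt
      have hstep : pvBLoop (fuel+1) s out =
          pvBLoop fuel (pvNext s i) (out ++ [String.ofList (pvNext s i)]) := by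
        show (match pvScanTop s with
          | none => out
          | some i => pvBLoop fuel (pvNext s i) (out ++ [String.ofList (pvNext s i)])) = _
        rw [hscan]
      rw [hstep, ih N Q (pvNext s i) _ hmem hlen, hafter]
      simp

-- ---- A's recursion produces pvComb ----

theorem pv_foldl_append_map {α β : Type} (f : α → β) :
    ∀ (xs : List α) (acc : List β), xs.foldl (fun L x => L ++ [f x]) acc = acc ++ xs.map f := by
  intro xs
  induction xs with
  | nil => intro acc; simp
  | cons a t ih => intro acc; simp [List.foldl, ih]

-- the two DecidableLT instances on List Char give the same sort
theorem pv_sorted_inst (L : List (List Char)) :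
    PySem.List.sorted L (fun x => x) =
    @PySem.List.sorted (List Char) (List Char) List.instLinearOrder.toLT LinearOrder.toDecidableLT L (fun x => x) false := by
  congr 1

theorem pvA_neg : ∀ (fuel : Nat) (n q : Int), q < 0 → 0 ≤ n → n.toNat < fuel →
    pvARec fuel n q = [] := by
  intro fuel
  induction fuel with
  | zero => intro n q _ _ h; omega
  | succ fuel ih =>
    intro n q hq hn hf
    by_cases h0 : n = 0
    · simp [pvARec, h0]
    have h1 := ih (n-1) (q-1) (by omega) (by omega) (by omega)
    have h2 := ih (n-1) q (by omega) (by omega) (by omega)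
    simp only [pvARec]
    rw [if_neg h0, if_neg (by omega), if_neg (by omega), if_neg (by omega), h1, h2]
    rfl

theorem pvA_comb : ∀ (fuel : Nat) (n q : Int), 1 ≤ n → 0 ≤ q → q ≤ n → n.toNat < fuel →
    pvARec fuel n q = pvComb n.toNat q.toNat := by
  intro fuel
  induction fuel with
  | zero => intro n q _ _ _ h; omega
  | succ fuel ih =>
    intro n q hn hq hqn hf
    by_cases hq0 : q = 0
    · subst hq0
      simp only [pvARec]
      rw [if_neg (show ¬n = 0 by omega), if_neg (show ¬(0:Int) > n by omega)]
      simp [pvComb_zero, PySem.List.pyRepeat_singleton]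
    by_cases hnq : n = q
    · simp only [pvARec]
      rw [if_neg (by omega), if_neg (by omega), if_neg hq0, if_pos hnq, hnq, pvComb_self]
      simp [PySem.List.pyRepeat_singleton]
    -- recursive case: 1 ≤ q < n
    have ih1 := ih (n-1) (q-1) (by omega) (by omega) (by omega) (by omega)
    have ih2 := ih (n-1) q (by omega) (by omega) (by omega) (by omega)
    simp only [pvARec]
    rw [if_neg (by omega), if_neg (by omega), if_neg hq0, if_neg hnq]
    simp only [pv_foldl_append_map, List.nil_append, ih1, ih2]
    have hn1 : (n-1).toNat = n.toNat - 1 := by omega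
    have hq1 : (q-1).toNat = q.toNat - 1 := by omega
    obtain ⟨m, hm⟩ : ∃ m, n.toNat = m + 1 := ⟨n.toNat - 1, by omega⟩
    obtain ⟨r, hr⟩ : ∃ r, q.toNat = r + 1 := ⟨q.toNat - 1, by omega⟩
    rw [hn1, hq1, hm, hr]
    simp only [Nat.add_sub_cancel]
    have hcomb : pvComb (m+1) (r+1) =
        (pvComb m (r+1)).map (fun x => '0' :: x) ++ (pvComb m r).map (fun x => '1' :: x) := rfl
    rw [hcomb, pv_sorted_inst]
    exact PySem.List.sorted_eq_of_perm_of_pairwise_lt _ _ _ List.perm_append_comm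
      (hcomb ▸ pvComb_pairwise (m+1) (r+1))

-- ===== VERDICT (by name: the statement is the Claim_ definition above) =====
theorem all_nq_sub_spec : Claim_equal_all_nq_sub := by
  intro n q _ hpre
  unfold Spec_all_nq_sub all_nq_sub all_nq_sub_alt
  obtain ⟨hpre1, hpre2⟩ := hpre
  by_cases hq : q < 0
  · rw [if_pos (Or.inr (Or.inl hq))]
    rcases hpre1 hq with ⟨hn0, -⟩ | hlt
    · rw [pvA_neg (n.toNat + 1) n q hq hn0 (by omega)]
      rfl
    · simp only [pvARec]
      rw [if_neg (show ¬n = 0 by omega), if_pos (show q > n by omega)]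
      rfl
  replace hq : 0 ≤ q := by omega
  by_cases hn : n ≤ 0
  · rw [if_pos (Or.inl hn)]
    by_cases h0 : n = 0
    · simp [pvARec, h0]
    · simp only [pvARec]
      rw [if_neg h0, if_pos (by omega)]
      rfl
  replace hn : 1 ≤ n := by omega
  by_cases hqn : q > n
  · rw [if_pos (Or.inr (Or.inr hqn))]
    simp only [pvARec]
    rw [if_neg (by omega), if_pos hqn]
    rfl
  replace hqn : q ≤ n := by omega
  -- main case: 1 ≤ n, 0 ≤ q ≤ n
  rw [if_neg (by rintro (h|h|h) <;> omega)]
  rw [pvA_comb (n.toNat + 1) n q (by omega) hq hqn (by omega)]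
  have hsub : (n - q).toNat = n.toNat - q.toNat := by omega
  obtain ⟨r, hr⟩ := pvComb_head n.toNat q.toNat (by omega)
  rw [hsub]
  set s0 := List.replicate (n.toNat - q.toNat) '0' ++ List.replicate q.toNat '1' with hs0
  have hmem : s0 ∈ pvComb n.toNat q.toNat := by rw [hr]; simp
  have hafter : pvAfter (pvComb n.toNat q.toNat) s0 = r := by rw [hr]; exact pvAfter_cons_self _ _
  have hlt : (pvAfter (pvComb n.toNat q.toNat) s0).length < Nat.choose n.toNat q.toNat := by
    rw [hafter, ← pvComb_length, hr]; simp
  rw [pvLoop _ _ _ _ _ hmem hlt, hafter, hr]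
  simp
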